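-- pv_equiv track=rewrite | github.com/jiaola/usaco | bronze/guess/guess.py | most_animals
-- ===== SOURCE A (Python) =====
-- def most_animals(d, l):
--     m = 0
--     for key, val in d.items():
--         count = sum([val[i] for i in l])
--         if count > m:
--             m = count
--             k = key
--     return k
-- ===== SOURCE B (Python) =====
-- def most_animals(d, l):
--     # Weighted-by-multiplicity sums (each distinct index read once per key),
--     # then a separate max-then-first-match selection pass.
--     cnt = {}
--     for i in l:
--         cnt[i] = cnt.get(i, 0) + 1
--     sums = [(key, sum(c * val[i] for i, c in cnt.items())) for key, val in d.items()]
--     best = max(s for _, s in sums)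
--     for key, s in sums:
--         if s == best:
--             return key
-- ===== Notes on version B (the rewrite author's own statement) =====
-- stated objective: alternative
-- what changed: B first builds an index-multiplicity counter and computes each key's sum as a count-weighted sum over distinct indices, then selects the answer in a separate pass as the first key whose sum equals max(sums), instead of A's single row-major sum-then-strict-compare loop seeded at 0.
import Mathlib
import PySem

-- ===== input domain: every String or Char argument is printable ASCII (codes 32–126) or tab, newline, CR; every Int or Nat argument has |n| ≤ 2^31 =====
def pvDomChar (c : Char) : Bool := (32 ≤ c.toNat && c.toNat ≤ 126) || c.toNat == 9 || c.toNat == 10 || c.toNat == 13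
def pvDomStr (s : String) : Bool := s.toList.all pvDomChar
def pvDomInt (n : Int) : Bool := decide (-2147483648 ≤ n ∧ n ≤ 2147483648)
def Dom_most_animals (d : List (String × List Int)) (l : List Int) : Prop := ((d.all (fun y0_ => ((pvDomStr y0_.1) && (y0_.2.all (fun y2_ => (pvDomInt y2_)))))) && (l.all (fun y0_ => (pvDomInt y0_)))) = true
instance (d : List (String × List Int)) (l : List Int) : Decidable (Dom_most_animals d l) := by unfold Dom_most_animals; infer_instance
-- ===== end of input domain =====

-- B replaces A's single row-major sum-then-strict-compare loop by a counter-weighted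
-- sum table plus a separate max-then-first-match selection pass (objective: alternative).

-- ===== PORT A =====
-- Python's `k` is unassigned until the first count > m; modelled as Option String;
-- the final `return k` raises UnboundLocalError when it is still none — excluded by Pre_.
def most_animals (d : List (String × List Int)) (l : List Int) : String :=
  let r := d.foldl (fun (st : Int × Option String) kv =>
      let count := (l.map (fun i => PySem.List.pyGetD kv.2 i 0)).sum
      if st.1 < count then (count, some kv.1) else st)
    ((0 : Int), (none : Option String))
  match r.2 with
  | some k => k
  | none => ""   -- Python: UnboundLocalError; outside Pre_

-- ===== PORT B =====
def most_animals_alt (d : List (String × List Int)) (l : List Int) : String :=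
  let cnt := l.foldl (fun (c : PySem.Dict Int Int) i => c.insert i (c.getD i 0 + 1)) PySem.Dict.empty
  let sums := d.map (fun kv =>
      (kv.1, (cnt.items.map (fun ic => ic.2 * PySem.List.pyGetD kv.2 ic.1 0)).sum))
  match PySem.List.max? (sums.map (fun p => p.2)) (fun x => x) with
  | none => ""   -- Python: max() on empty raises ValueError; outside Pre_
  | some best =>
    match sums.find? (fun p => p.2 == best) with
    | some p => p.1
    | none => ""   -- unreachable: best is a member of the list

-- ===== PRECONDITION & SPEC =====
-- Pre_ excludes exactly the inputs where the Python A raises: an index of l out of range for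
-- some value list (IndexError), and inputs where no key's selected sum is positive — in
-- particular an empty d — (UnboundLocalError: k never assigned); it also excludes assoc lists
-- with duplicate keys, which cannot occur as a Python dict.
def Pre_most_animals (d : List (String × List Int)) (l : List Int) : Prop :=
  (d.map Prod.fst).Nodup ∧
  (∀ kv ∈ d, ∀ i ∈ l, PySem.Raise.InRange kv.2.length i) ∧
  (∃ kv ∈ d, 0 < (l.map (fun i => PySem.List.pyGetD kv.2 i 0)).sum)
instance (d : List (String × List Int)) (l : List Int) : Decidable (Pre_most_animals d l) := by
  unfold Pre_most_animals; infer_instance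

def pvWitness_most_animals : (List (String × List Int)) × List Int :=
  ([("cow", [3, 1]), ("pig", [2, 2])], [0, 1])

def Spec_most_animals (d : List (String × List Int)) (l : List Int) (out : String) : Prop :=
  out = most_animals_alt d l
instance (d : List (String × List Int)) (l : List Int) (out : String) : Decidable (Spec_most_animals d l out) := by
  unfold Spec_most_animals; infer_instance

-- ===== CLAIM (what is proved, stated in full; the proofs are below) =====
def Claim_equal_most_animals : Prop := ∀ (d : List (String × List Int)) (l : List Int), Dom_most_animals d l → Pre_most_animals d l → Spec_most_animals d l (most_animals d l)


-- ===== LEMMAS AND PROOFS =====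

-- sum over a Nodup list of an indicator-weighted term picks out the one element
lemma sum_indicator_of_nodup (s : List Int) (f : Int → Int) (x : Int)
    (hnd : s.Nodup) (hx : x ∈ s) :
    (s.map (fun i => if i = x then f i else 0)).sum = f x := by
  induction s with
  | nil => cases hx
  | cons a t ih =>
    obtain ⟨ha, hndt⟩ := List.nodup_cons.mp hnd
    simp only [List.map_cons, List.sum_cons]
    rcases List.mem_cons.mp hx with h | h
    · rw [← h] at ha ⊢
      have hz : (t.map (fun i => if i = x then f i else 0)).sum = 0 := by
        apply List.sum_eq_zero
        intro y hy
        rcases List.mem_map.mp hy with ⟨i, hi, rfl⟩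
        have : i ≠ x := fun he => ha (he ▸ hi)
        simp [this]
      simp [hz]
    · have hax : a ≠ x := fun he => ha (he ▸ h)
      rw [if_neg hax, ih hndt h]
      ring

-- weighted-by-count sum over a Nodup superset of l's elements equals the plain sum over l
lemma sum_count_over (f : Int → Int) (s : List Int) (hnd : s.Nodup) :
    ∀ l : List Int, (∀ x ∈ l, x ∈ s) →
      (s.map (fun i => (List.count i l : Int) * f i)).sum = (l.map f).sum := by
  intro l
  induction l with
  | nil => intro _; simp
  | cons x t ih =>
    intro hsub
    have hxs : x ∈ s := hsub x List.mem_cons_self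
    have hpt : ∀ i ∈ s, (List.count i (x :: t) : Int) * f i
        = (List.count i t : Int) * f i + (if i = x then f i else 0) := by
      intro i _
      rw [List.count_cons]
      by_cases h : i = x
      · subst h; simp; ring
      · have h' : ¬ x = i := fun he => h he.symm
        simp [h, h']
    rw [List.map_congr_left hpt, PySem.List.sum_map_add_int,
      sum_indicator_of_nodup s f x hnd hxs,
      ih (fun y hy => hsub y (List.mem_cons_of_mem _ hy)), List.map_cons, List.sum_cons]
    ring

lemma sum_count_weighted (l : List Int) (f : Int → Int) :
    ((PySem.Set.ofList l).map (fun i => (List.count i l : Int) * f i)).sum = (l.map f).sum :=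
  sum_count_over f _ (PySem.Set.nodup_ofList l) l (fun x hx => (PySem.Set.mem_ofList l x).mpr hx)

-- a running max with a projection commutes with an outer max on the seed
lemma foldl_maxf_max {β : Type} (f : β → Int) (t : List β) (c a : Int) :
    t.foldl (fun acc y => max acc (f y)) (max c a) = max c (t.foldl (fun acc y => max acc (f y)) a) := by
  induction t generalizing a with
  | nil => rfl
  | cons q t ih =>
    simp only [List.foldl_cons]
    rw [max_assoc, ih]

-- a running max does not move when every element is below the seed
lemma foldl_maxf_of_le {β : Type} (f : β → Int) (t : List β) (a : Int)
    (h : ∀ q ∈ t, f q ≤ a) : t.foldl (fun acc y => max acc (f y)) a = a := by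
  induction t with
  | nil => rfl
  | cons q t ih =>
    simp only [List.foldl_cons]
    rw [max_eq_left (h q List.mem_cons_self), ih (fun r hr => h r (List.mem_cons_of_mem _ hr))]

-- characterisation of A's running strict-greater argmax fold over (key, sum) pairs
lemma argmax_fold (ps : List (String × Int)) :
    ∀ (m : Int) (k : Option String),
      (ps.foldl (fun (st : Int × Option String) p => if st.1 < p.2 then (p.2, some p.1) else st) (m, k)).1
        = ps.foldl (fun a p => max a p.2) m ∧
      ((∃ p ∈ ps, m < p.2) →
        ∃ p, ps.find? (fun q => q.2 == ps.foldl (fun a p => max a p.2) m) = some p ∧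
          (ps.foldl (fun (st : Int × Option String) p => if st.1 < p.2 then (p.2, some p.1) else st) (m, k)).2 = some p.1) ∧
      ((∀ p ∈ ps, p.2 ≤ m) →
        ps.foldl (fun (st : Int × Option String) p => if st.1 < p.2 then (p.2, some p.1) else st) (m, k) = (m, k)) := by
  induction ps with
  | nil =>
    intro m k
    refine ⟨rfl, ?_, fun _ => rfl⟩
    rintro ⟨p, hp, -⟩; cases hp
  | cons p t ih =>
    intro m k
    by_cases h : m < p.2
    · simp only [List.foldl_cons, if_pos h]
      have hmax : max m p.2 = p.2 := max_eq_right h.le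
      obtain ⟨ih1, ih2, ih3⟩ := ih p.2 (some p.1)
      rw [hmax]
      refine ⟨ih1, ?_, ?_⟩
      · intro _
        by_cases h2 : ∃ q ∈ t, p.2 < q.2
        · obtain ⟨pf, hfind, hsnd⟩ := ih2 h2
          obtain ⟨q0, hq0, hlt⟩ := h2
          have hR : p.2 < t.foldl (fun a p => max a p.2) p.2 :=
            lt_of_lt_of_le hlt ((PySem.List.le_foldl_max_int t Prod.snd p.2).2 q0 hq0)
          have hne : (p.2 == t.foldl (fun a p => max a p.2) p.2) = false :=
            beq_eq_false_iff_ne.mpr (ne_of_lt hR)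
          exact ⟨pf, by rw [List.find?_cons_of_neg (by simp [hne])]; exact hfind, hsnd⟩
        · push_neg at h2
          have hstay : t.foldl (fun a p => max a p.2) p.2 = p.2 := foldl_maxf_of_le Prod.snd t p.2 h2
          refine ⟨p, ?_, ?_⟩
          · rw [hstay, List.find?_cons_of_pos (by simp)]
          · rw [ih3 h2]
      · intro hall
        exact absurd (hall p List.mem_cons_self) (not_le.mpr h)
    · have hle : p.2 ≤ m := not_lt.mp h
      simp only [List.foldl_cons, if_neg h]
      have hmax : max m p.2 = m := max_eq_left hle
      obtain ⟨ih1, ih2, ih3⟩ := ih m k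
      rw [hmax]
      refine ⟨ih1, ?_, ?_⟩
      · rintro ⟨q, hq, hlt⟩
        have hq' : q ∈ t := by
          rcases List.mem_cons.mp hq with rfl | hh
          · exact absurd hlt h
          · exact hh
        obtain ⟨pf, hfind, hsnd⟩ := ih2 ⟨q, hq', hlt⟩
        have hR : p.2 < t.foldl (fun a p => max a p.2) m :=
          lt_of_le_of_lt hle (lt_of_lt_of_le hlt ((PySem.List.le_foldl_max_int t Prod.snd m).2 q hq'))
        have hne : (p.2 == t.foldl (fun a p => max a p.2) m) = false :=
          beq_eq_false_iff_ne.mpr (ne_of_lt hR)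
        exact ⟨pf, by rw [List.find?_cons_of_neg (by simp [hne])]; exact hfind, hsnd⟩
      · intro hall
        exact ih3 (fun q hq => hall q (List.mem_cons_of_mem _ hq))

-- the strict-greater running argmax equals max-then-first-match selection
lemma select_eq (ps : List (String × Int)) (hpos : ∃ p ∈ ps, 0 < p.2) :
    (match (ps.foldl (fun (st : Int × Option String) p => if st.1 < p.2 then (p.2, some p.1) else st) ((0 : Int), (none : Option String))).2 with
      | some k => k
      | none => "") =
    (match PySem.List.max? (ps.map (fun p => p.2)) (fun x => x) with
      | none => ""
      | some best =>
        match ps.find? (fun p => p.2 == best) with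
        | some p => p.1
        | none => "") := by
  obtain ⟨p0, hp0, hp0pos⟩ := hpos
  cases ps with
  | nil => cases hp0
  | cons q rest =>
    obtain ⟨h1, h2, h3⟩ := argmax_fold (q :: rest) 0 none
    obtain ⟨pf, hfind, hsnd⟩ := h2 ⟨p0, hp0, hp0pos⟩
    have hMpos : 0 < (q :: rest).foldl (fun a p => max a p.2) 0 :=
      lt_of_lt_of_le hp0pos ((PySem.List.le_foldl_max_int (q :: rest) Prod.snd 0).2 p0 hp0)
    have hsplit : (q :: rest).foldl (fun a p => max a p.2) 0
        = max 0 (rest.foldl (fun a p => max a p.2) q.2) := by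
      simp only [List.foldl_cons]
      simpa using foldl_maxf_max Prod.snd rest 0 q.2
    have hbest : (rest.map (fun p => p.2)).foldl max q.2 = (q :: rest).foldl (fun a p => max a p.2) 0 := by
      have hpos2 : 0 < rest.foldl (fun a p => max a p.2) q.2 := by
        rw [hsplit] at hMpos
        rcases lt_max_iff.mp hMpos with h | h
        · exact absurd h (lt_irrefl 0)
        · exact h
      rw [List.foldl_map, hsplit]
      exact (max_eq_right hpos2.le).symm
    rw [hsnd, List.map_cons, PySem.List.max?_id_cons, hbest]
    have hc : List.foldl (fun a p => max a p.2) (max 0 q.2) rest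
        = List.foldl (fun a p => max a p.2) 0 (q :: rest) := rfl
    simp only [List.foldl_cons]
    rw [hc, hfind]

-- ===== VERDICT (by name: the statement is the Claim_ definition above) =====
theorem most_animals_spec : Claim_equal_most_animals := by
  intro d l _ hpre
  obtain ⟨-, -, kv0, hkv0, hpos⟩ := hpre
  unfold Spec_most_animals most_animals most_animals_alt
  simp only [PySem.Dict.foldl_insert_getD_add_one_eq_counter, PySem.Dict.items_counter,
    List.map_map]
  -- B's per-key weighted sums are A's row sums
  have hrow : ∀ kv : String × List Int,
      ((PySem.Set.ofList l).map
        ((fun ic : Int × Int => ic.2 * PySem.List.pyGetD kv.2 ic.1 0) ∘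
          fun k => (k, (List.count k l : Int)))).sum
        = (l.map (fun i => PySem.List.pyGetD kv.2 i 0)).sum := by
    intro kv
    have := sum_count_weighted l (fun i => PySem.List.pyGetD kv.2 i 0)
    simpa [Function.comp] using this
  simp only [hrow]
  have hm := select_eq (d.map (fun kv => (kv.1, (l.map (fun i => PySem.List.pyGetD kv.2 i 0)).sum)))
    ⟨(kv0.1, (l.map (fun i => PySem.List.pyGetD kv0.2 i 0)).sum),
      List.mem_map_of_mem hkv0, hpos⟩
  simp only [List.foldl_map, List.map_map] at hm
  exact hm
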